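-- pv_equiv track=rewrite | github.com/MinnSeoo/CodingTest | 프로그래머스/unrated/181854. 배열의 길이에 따라 다른 연산하기/배열의 길이에 따라 다른 연산하기.py | solution
-- ===== SOURCE A (Python) =====
-- def solution(arr,n):
--     result = []
--
--     for idx,num in enumerate(arr):
--         if (len(arr) % 2 == 0 and idx % 2 != 0) or (len(arr) % 2 != 0 and idx % 2 == 0):
--             result.append(num+n)
--         else:
--             result.append(num)
--     return result
-- ===== SOURCE B (Python) =====
-- def solution(arr, n):
--     # Pair-chunking: peel off one untouched head element when the length is even,
--     # then walk the rest two at a time, bumping the first of each pair.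
--     if len(arr) % 2 == 1:
--         out, rest = [], arr
--     elif arr:
--         out, rest = [arr[0]], arr[1:]
--     else:
--         return []
--     i = 0
--     while i + 1 < len(rest):
--         out += [rest[i] + n, rest[i + 1]]
--         i += 2
--     if i < len(rest):
--         out += [rest[i] + n]
--     return out
-- ===== Notes on version B (the rewrite author's own statement) =====
-- stated objective: alternative
-- what changed: Replaces the per-element parity test over enumerate(arr) by a pair-chunking walk: one untouched head element is peeled off when the length is even, then an index walks the rest two positions at a time, adding n to the first element of each pair.
import Mathlib
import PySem

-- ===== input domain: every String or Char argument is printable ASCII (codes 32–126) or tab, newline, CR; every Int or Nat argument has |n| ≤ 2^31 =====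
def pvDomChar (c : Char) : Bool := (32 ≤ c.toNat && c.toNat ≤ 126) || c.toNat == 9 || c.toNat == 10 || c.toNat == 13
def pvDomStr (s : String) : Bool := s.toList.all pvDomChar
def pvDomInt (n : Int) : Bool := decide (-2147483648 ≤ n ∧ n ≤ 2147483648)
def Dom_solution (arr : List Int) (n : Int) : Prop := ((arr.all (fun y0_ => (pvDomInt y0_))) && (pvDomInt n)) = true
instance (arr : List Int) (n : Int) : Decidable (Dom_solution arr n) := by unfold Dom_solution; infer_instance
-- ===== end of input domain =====

-- B replaces A's per-element parity branch over enumerate(arr) by a pair-chunking walk (alternative decomposition, same cost).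


-- ===== PORT A =====
-- for idx,num in enumerate(arr): append(num+n) if the parity test fires, else append(num)
def solution (arr : List Int) (n : Int) : List Int :=
  (PySem.List.enumerate arr 0).foldl
    (fun result p =>
      if ((arr.length % 2 == 0) && (p.1 % 2 != 0)) || ((arr.length % 2 != 0) && (p.1 % 2 == 0))
      then result ++ [p.2 + n] else result ++ [p.2]) []

-- ===== PORT B =====
-- the 'while i + 1 < len(rest)' loop of Source B: walk rest two indices at a time, bumping the first of each pair
def bumpLoop (out : List Int) (rest : List Int) (n : Int) (i : Nat) : List Int :=
  if h : i + 1 < rest.length then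
    bumpLoop (out ++ [rest[i] + n, rest[i + 1]]) rest n (i + 2)
  else if h2 : i < rest.length then out ++ [rest[i] + n]
  else out
termination_by rest.length - i

def solution_alt (arr : List Int) (n : Int) : List Int :=
  if arr.length % 2 == 1 then bumpLoop [] arr n 0
  else match arr with
    | [] => []
    | x :: rest => bumpLoop [x] rest n 0

-- ===== PRECONDITION & SPEC =====
def Spec_solution (arr : List Int) (n : Int) (out : List Int) : Prop := out = solution_alt arr n
instance (arr : List Int) (n : Int) (out : List Int) : Decidable (Spec_solution arr n out) := by unfold Spec_solution; infer_instance

-- ===== CLAIM (what is proved, stated in full; the proofs are below) =====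
def Claim_equal_solution : Prop := ∀ (arr : List Int) (n : Int), Dom_solution arr n → Spec_solution arr n (solution arr n)

-- ===== LEMMAS AND PROOFS =====

-- proof-only: add n at alternating positions, starting at position 0 iff the flag is true
def mark (b : Bool) (xs : List Int) (n : Int) : List Int :=
  match b, xs with
  | _, [] => []
  | true, x :: xs => (x + n) :: mark false xs n
  | false, x :: xs => x :: mark true xs n

lemma bumpLoop_eq_mark (n : Int) (out xs : List Int) (i : Nat) :
    bumpLoop out xs n i = out ++ mark true (xs.drop i) n := by
  induction out, i using bumpLoop.induct (rest := xs) (n := n) with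
  | case1 out i h ih =>
      rw [bumpLoop, dif_pos h, ih,
        List.drop_eq_getElem_cons (by omega : i < xs.length),
        List.drop_eq_getElem_cons (by omega : i + 1 < xs.length)]
      simp [mark]
  | case2 out i h h2 =>
      rw [bumpLoop, dif_neg h, dif_pos h2,
        List.drop_eq_getElem_cons (by omega : i < xs.length)]
      have : xs.drop (i + 1) = [] := List.drop_eq_nil_of_le (by omega)
      simp [this, mark]
  | case3 out i h h2 =>
      rw [bumpLoop, dif_neg h, dif_neg h2]
      have : xs.drop i = [] := List.drop_eq_nil_of_le (by omega)
      simp [this, mark]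

lemma map_enum_eq_mark (n : Int) (t : Int) (ht : t = 0 ∨ t = 1) :
    ∀ (xs : List Int) (s : Int), 0 ≤ s →
      (PySem.List.enumerate xs s).map (fun p => if p.1 % 2 == t then p.2 + n else p.2)
        = mark (s % 2 == t) xs n := by
  intro xs
  induction xs with
  | nil => intro s _; simp [PySem.List.enumerate_nil, mark]
  | cons x xs ih =>
      intro s hs
      rw [PySem.List.enumerate_cons]
      have hflip : ((s + 1) % 2 == t) = !(s % 2 == t) := by
        rcases ht with h | h <;> subst h <;>
          · rcases Int.emod_two_eq s with h2 | h2 <;>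
              simp [Int.add_emod, h2]
      rcases h2 : (s % 2 == t) with _ | _
      · simp only [List.map_cons, ih (s + 1) (by omega), hflip, h2, mark]
        simp
      · simp only [List.map_cons, ih (s + 1) (by omega), hflip, h2, mark]
        simp

lemma foldl_solution_eq_map (c : Int × Int → Bool) (n : Int) (l : List (Int × Int)) (acc : List Int) :
    l.foldl (fun result p => if c p then result ++ [p.2 + n] else result ++ [p.2]) acc
      = acc ++ l.map (fun p => if c p then p.2 + n else p.2) := by
  induction l generalizing acc with
  | nil => simp
  | cons p l ih => by_cases h : c p <;> simp [List.foldl_cons, h, ih]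

-- ===== VERDICT (by name: the statement is the Claim_ definition above) =====
theorem solution_spec : Claim_equal_solution := by
  intro arr n _
  unfold Spec_solution solution solution_alt
  rw [foldl_solution_eq_map]
  by_cases hL : arr.length % 2 = 0
  · -- even length: A's test is idx % 2 != 0, i.e. idx % 2 == 1
    have hc : ∀ (p : Int × Int),
        (((arr.length % 2 == 0) && (p.1 % 2 != 0)) || ((arr.length % 2 != 0) && (p.1 % 2 == 0)))
        = (p.1 % 2 == (1 : Int)) := by
      intro p
      simp only [hL]
      rcases Int.emod_two_eq p.1 with h2 | h2 <;> simp [h2]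
    simp only [hc]
    rw [map_enum_eq_mark n 1 (Or.inr rfl) arr 0 le_rfl]
    have : (arr.length % 2 == 1) = false := by simp [hL]
    rw [this]
    cases arr with
    | nil => simp [mark]
    | cons x rest =>
        simp only [Bool.false_eq_true, if_false, bumpLoop_eq_mark]
        simp [mark]
  · -- odd length: A's test is idx % 2 == 0
    have hk : arr.length % 2 = 1 := by omega
    have hc : ∀ (p : Int × Int),
        (((arr.length % 2 == 0) && (p.1 % 2 != 0)) || ((arr.length % 2 != 0) && (p.1 % 2 == 0)))
        = (p.1 % 2 == (0 : Int)) := by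
      intro p
      simp [hk]
    simp only [hc]
    rw [map_enum_eq_mark n 0 (Or.inl rfl) arr 0 le_rfl]
    simp [hk, bumpLoop_eq_mark]
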